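-- pv_equiv track=rewrite | github.com/jorzaiy/Threadloom | backend/clue_bootstrap_agent.py | _merge_clues
-- ===== SOURCE A (Python) =====
-- from copy import deepcopy
--
-- def _merge_clues(existing: list[dict], incoming: list[dict]) -> list[dict]:
--     merged = []
--     existing_summaries = set()
--     for item in existing:
--         s = str(item.get('summary', '') or '').strip()
--         if s:
--             existing_summaries.add(s[:15])
--             merged.append(deepcopy(item))
--     for item in incoming:
--         s = str(item.get('summary', '') or '').strip()
--         if not s:
--             continue
--         key = s[:15]
--         if key in existing_summaries:
--             # 更新已有线索的置信度
--             for m in merged: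
--                 if str(m.get('summary', '') or '').strip()[:15] == key:
--                     if item.get('confidence') == 'high':
--                         m['confidence'] = 'high'
--                     elif item.get('confidence') == 'medium' and m.get('confidence') != 'high':
--                         m['confidence'] = 'medium'
--                     break
--         else:
--             merged.append(deepcopy(item))
--             existing_summaries.add(key)
--     # 限制总数
--     return merged[:20]
-- ===== SOURCE B (Python) =====
-- from copy import deepcopy
--
-- def _merge_clues(existing: list[dict], incoming: list[dict]) -> list[dict]:
--     merged = []
--     existing_prefixes = set()
--     for item in existing:
--         s = str(item.get('summary', '') or '').strip()
--         if s:
--             existing_prefixes.add(s[:15])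
--             merged.append(deepcopy(item))
--     # One pass over incoming: collect brand-new clues in order, and per-prefix
--     # confidence bumps for items that duplicate an already-known clue.
--     news = []
--     seen_new = set()
--     bumps = {}
--     for item in incoming:
--         s = str(item.get('summary', '') or '').strip()
--         if not s:
--             continue
--         key = s[:15]
--         if key not in existing_prefixes and key not in seen_new:
--             seen_new.add(key)
--             news.append(deepcopy(item))
--         else:
--             c = item.get('confidence')
--             hi, med = bumps.get(key, (False, False))
--             bumps[key] = (hi or c == 'high', med or c == 'medium')
--     # Apply each prefix's bump to the first clue carrying that prefix.
--     out = []
--     for m in merged + news: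
--         key = str(m.get('summary', '') or '').strip()[:15]
--         if key in bumps:
--             hi, med = bumps.pop(key)
--             if hi:
--                 m = dict(m)
--                 m['confidence'] = 'high'
--             elif med and m.get('confidence') != 'high':
--                 m = dict(m)
--                 m['confidence'] = 'medium'
--         out.append(m)
--     return out[:20]
-- ===== Notes on version B (the rewrite author's own statement) =====
-- stated objective: alternative
-- what changed: A rescans the merged list for every incoming item that matches a known summary prefix; B makes one pass over incoming collecting new clues plus a per-prefix confidence-bump table, then applies each bump to the first clue with that prefix in a single application pass.
import Mathlib
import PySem

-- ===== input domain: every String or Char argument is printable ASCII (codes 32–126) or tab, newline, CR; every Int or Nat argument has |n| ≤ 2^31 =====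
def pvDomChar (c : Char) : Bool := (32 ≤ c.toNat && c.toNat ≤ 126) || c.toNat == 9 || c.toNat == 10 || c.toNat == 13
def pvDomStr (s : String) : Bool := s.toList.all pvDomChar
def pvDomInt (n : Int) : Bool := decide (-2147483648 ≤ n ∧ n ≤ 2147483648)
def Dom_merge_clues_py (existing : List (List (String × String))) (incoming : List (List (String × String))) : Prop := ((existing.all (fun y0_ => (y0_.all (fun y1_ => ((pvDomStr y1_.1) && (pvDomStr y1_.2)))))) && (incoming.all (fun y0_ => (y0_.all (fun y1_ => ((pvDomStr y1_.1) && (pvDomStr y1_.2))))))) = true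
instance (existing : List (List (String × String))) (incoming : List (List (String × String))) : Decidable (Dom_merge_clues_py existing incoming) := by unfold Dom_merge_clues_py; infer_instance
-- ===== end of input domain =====

-- B replaces A's per-incoming-item linear rescans of `merged` by one grouping pass
-- (new clues + per-prefix confidence bumps) and one application pass (alternative decomposition).
-- Both Pythons only deep-copy their inputs (no observable mutation); equivalence is about the return value.

-- ===== PORT A =====
def pvA_sum (item : List (String × String)) : String :=
  PySem.Str.strip ((PySem.Dict.mk item).getD "summary" "")

def pvA_upd (item m : List (String × String)) : List (String × String) :=
  if (PySem.Dict.mk item).get? "confidence" = some "high" then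
    ((PySem.Dict.mk m).insert "confidence" "high").items
  else if (PySem.Dict.mk item).get? "confidence" = some "medium" ∧
          (PySem.Dict.mk m).get? "confidence" ≠ some "high" then
    ((PySem.Dict.mk m).insert "confidence" "medium").items
  else m

def pvA_updateFirst (key : String) (item : List (String × String)) :
    List (List (String × String)) → List (List (String × String))
  | [] => []
  | m :: rest =>
    if PySem.Str.slice (pvA_sum m) none (some 15) = key then pvA_upd item m :: rest
    else m :: pvA_updateFirst key item rest

def pvA_init (existing : List (List (String × String))) :
    List (List (String × String)) × PySem.Set String :=
  existing.foldl (fun st item =>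
    let s := pvA_sum item
    if s = "" then st
    else (st.1 ++ [item], st.2.add (PySem.Str.slice s none (some 15)))) ([], PySem.Set.empty)

def pvA_step (st : List (List (String × String)) × PySem.Set String)
    (item : List (String × String)) : List (List (String × String)) × PySem.Set String :=
  let s := pvA_sum item
  if s = "" then st
  else
    let key := PySem.Str.slice s none (some 15)
    if st.2.contains key then (pvA_updateFirst key item st.1, st.2)
    else (st.1 ++ [item], st.2.add key)

def merge_clues_py (existing : List (List (String × String))) (incoming : List (List (String × String))) : List (List (String × String)) :=
  PySem.List.slice ((incoming.foldl pvA_step (pvA_init existing)).1) none (some 20)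

-- ===== PORT B =====
def pvB_sum (item : List (String × String)) : String :=
  PySem.Str.strip ((PySem.Dict.mk item).getD "summary" "")

def pvB_key (m : List (String × String)) : String :=
  PySem.Str.slice (pvB_sum m) none (some 15)

def pvB_bump (fl : Bool × Bool) (m : List (String × String)) : List (String × String) :=
  if fl.1 = true then ((PySem.Dict.mk m).insert "confidence" "high").items
  else if fl.2 = true ∧ (PySem.Dict.mk m).get? "confidence" ≠ some "high" then
    ((PySem.Dict.mk m).insert "confidence" "medium").items
  else m

def pvB_init (existing : List (List (String × String))) :
    List (List (String × String)) × PySem.Set String :=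
  existing.foldl (fun st item =>
    let s := pvB_sum item
    if s = "" then st
    else (st.1 ++ [item], st.2.add (PySem.Str.slice s none (some 15)))) ([], PySem.Set.empty)

def pvB_scanStep (prefixes0 : PySem.Set String)
    (st : List (List (String × String)) × PySem.Set String × PySem.Dict String (Bool × Bool))
    (item : List (String × String)) :
    List (List (String × String)) × PySem.Set String × PySem.Dict String (Bool × Bool) :=
  let s := pvB_sum item
  if s = "" then st
  else
    let key := PySem.Str.slice s none (some 15)
    if prefixes0.contains key = false ∧ st.2.1.contains key = false then
      (st.1 ++ [item], st.2.1.add key, st.2.2)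
    else
      let c := (PySem.Dict.mk item).get? "confidence"
      let old := st.2.2.getD key (false, false)
      (st.1, st.2.1, st.2.2.insert key
        (old.1 || decide (c = some "high"), old.2 || decide (c = some "medium")))

def pvB_apply : List (List (String × String)) → PySem.Dict String (Bool × Bool) → List (List (String × String))
  | [], _ => []
  | m :: rest, bumps =>
    match bumps.get? (pvB_key m) with
    | some fl => pvB_bump fl m :: pvB_apply rest (bumps.erase (pvB_key m))
    | none => m :: pvB_apply rest bumps

def merge_clues_py_alt (existing : List (List (String × String))) (incoming : List (List (String × String))) : List (List (String × String)) :=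
  let st0 := pvB_init existing
  let r := incoming.foldl (pvB_scanStep st0.2) ([], PySem.Set.empty, PySem.Dict.empty)
  PySem.List.slice (pvB_apply (st0.1 ++ r.1) r.2.2) none (some 20)

-- ===== PRECONDITION & SPEC =====
def Spec_merge_clues_py (existing : List (List (String × String))) (incoming : List (List (String × String))) (out : List (List (String × String))) : Prop := out = merge_clues_py_alt existing incoming
instance (existing : List (List (String × String))) (incoming : List (List (String × String))) (out : List (List (String × String))) : Decidable (Spec_merge_clues_py existing incoming out) := by unfold Spec_merge_clues_py; infer_instance

-- ===== CLAIM (what is proved, stated in full; the proofs are below) =====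
def Claim_equal_merge_clues_py : Prop := ∀ (existing : List (List (String × String))) (incoming : List (List (String × String))), Dom_merge_clues_py existing incoming → Spec_merge_clues_py existing incoming (merge_clues_py existing incoming)

-- ===== LEMMAS AND PROOFS =====

-- proof-side: item flags, flag combination, functional bump table
def pvFlags (item : List (String × String)) : Bool × Bool :=
  (decide ((PySem.Dict.mk item).get? "confidence" = some "high"),
   decide ((PySem.Dict.mk item).get? "confidence" = some "medium"))

def pvComb (fl : Bool × Bool) : Option (Bool × Bool) → Bool × Bool
  | none => fl
  | some g => (fl.1 || g.1, fl.2 || g.2)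

def pvCombO : Option (Bool × Bool) → Option (Bool × Bool) → Option (Bool × Bool)
  | none, b => b
  | some a, none => some a
  | some a, some b => some (a.1 || b.1, a.2 || b.2)

def pvUpdN (f : String → Option (Bool × Bool)) (k : String) : String → Option (Bool × Bool) :=
  fun x => if x = k then none else f x

def pvApplyF : List (List (String × String)) → (String → Option (Bool × Bool)) → List (List (String × String))
  | [], _ => []
  | m :: rest, f =>
    match f (pvB_key m) with
    | some fl => pvB_bump fl m :: pvApplyF rest (pvUpdN f (pvB_key m))
    | none => m :: pvApplyF rest f

def pvNewsF : (String → Bool) → List (List (String × String)) → List (List (String × String))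
  | _, [] => []
  | Q, item :: rest =>
    if pvB_sum item = "" then pvNewsF Q rest
    else if Q (pvB_key item) then pvNewsF Q rest
    else item :: pvNewsF (fun x => x == pvB_key item || Q x) rest

def pvFlagsF : (String → Bool) → List (List (String × String)) → String → Option (Bool × Bool)
  | _, [], _ => none
  | Q, item :: rest, k =>
    if pvB_sum item = "" then pvFlagsF Q rest k
    else if Q (pvB_key item) = false then pvFlagsF (fun x => x == pvB_key item || Q x) rest k
    else if pvB_key item = k then some (pvComb (pvFlags item) (pvFlagsF Q rest k))
    else pvFlagsF Q rest k

def pvUpdF (key : String) (fl : Bool × Bool) : List (List (String × String)) → List (List (String × String))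
  | [] => []
  | m :: rest => if pvB_key m = key then pvB_bump fl m :: rest else m :: pvUpdF key fl rest

theorem pv_get?_erase_self {ν : Type} (d : PySem.Dict String ν) (k : String) :
    (d.erase k).get? k = none := by
  simp only [PySem.Dict.erase, PySem.Dict.get?]
  induction d.items with
  | nil => simp
  | cons p rest ih =>
      by_cases hp : p.1 = k
      · simpa [hp] using ih
      · simp only [List.filter_cons]
        simpa [hp, List.find?] using ih

theorem pv_get?_erase_ne {ν : Type} (d : PySem.Dict String ν) (k k' : String) (h : k' ≠ k) :
    (d.erase k).get? k' = d.get? k' := by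
  simp only [PySem.Dict.erase, PySem.Dict.get?]
  induction d.items with
  | nil => simp
  | cons p rest ih =>
      by_cases hp : p.1 = k
      · have hfk : (!p.1 == k) = false := by simp [hp]
        have hpk : (p.1 == k') = false := by simp [hp, Ne.symm h]
        simp only [List.filter_cons, hfk, Bool.false_eq_true, if_false, List.find?, hpk]
        exact ih
      · have hfk : (!p.1 == k) = true := by simp [hp]
        simp only [List.filter_cons, hfk, if_true, List.find?]
        cases hq : (p.1 == k') with
        | true => simp
        | false => exact ih

theorem pv_contains_add (s : PySem.Set String) (x y : String) :
    ((s.add x).contains y) = (y == x || s.contains y) := by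
  simp only [PySem.Set.add, PySem.Set.contains]
  by_cases hc : List.contains s x = true
  · simp only [hc, if_true]
    by_cases hy : y = x
    · subst hy
      simp_all [List.contains_iff_mem]
    · simp [hy]
  · simp only [hc]
    simp only [Bool.false_eq_true, if_false, List.contains_append]
    simp only [List.contains_iff_mem, List.contains_cons, List.contains_nil]
    by_cases hy : y = x <;> simp [hy, Bool.or_comm]

theorem pv_mk_items {κ ν : Type} (d : PySem.Dict κ ν) : PySem.Dict.mk d.items = d := rfl

theorem pv_key_bump (fl : Bool × Bool) (m : List (String × String)) :
    pvB_key (pvB_bump fl m) = pvB_key m := by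
  unfold pvB_bump pvB_key pvB_sum
  have hne : "summary" ≠ "confidence" := by decide
  split_ifs with h1 h2
  · rw [pv_mk_items]
    simp [PySem.Dict.getD, PySem.Dict.get?_insert_of_ne _ _ hne]
  · rw [pv_mk_items]
    simp [PySem.Dict.getD, PySem.Dict.get?_insert_of_ne _ _ hne]
  · rfl

theorem pv_bump_comp (a b : Bool × Bool) (m : List (String × String)) :
    pvB_bump (a.1 || b.1, a.2 || b.2) m = pvB_bump b (pvB_bump a m) := by
  obtain ⟨a1, a2⟩ := a
  obtain ⟨b1, b2⟩ := b
  by_cases hm : (PySem.Dict.mk m).get? "confidence" = some "high" <;>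
    cases a1 <;> cases a2 <;> cases b1 <;> cases b2 <;>
      simp [pvB_bump, hm, pv_mk_items, PySem.Dict.get?_insert_self, PySem.Dict.insert_insert_self]

theorem pv_upd_eq_bump (item m : List (String × String)) :
    pvA_upd item m = pvB_bump (pvFlags item) m := by
  unfold pvA_upd pvB_bump pvFlags
  by_cases h1 : (PySem.Dict.mk item).get? "confidence" = some "high" <;>
    by_cases h2 : (PySem.Dict.mk item).get? "confidence" = some "medium" <;>
      simp [h1, h2]

theorem pv_sum_eq (m : List (String × String)) : pvA_sum m = pvB_sum m := rfl

theorem pv_updateFirst_eq (key : String) (item : List (String × String))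
    (M : List (List (String × String))) :
    pvA_updateFirst key item M = pvUpdF key (pvFlags item) M := by
  induction M with
  | nil => rfl
  | cons m rest ih =>
      simp only [pvA_updateFirst, pvUpdF, pv_sum_eq]
      by_cases h : pvB_key m = key
      · simp only [pvB_key] at h
        simp [h, pvB_key, pv_upd_eq_bump]
      · simp only [pvB_key] at h
        simp [h, pvB_key, ih]

theorem pv_updF_append (key : String) (fl : Bool × Bool)
    (M N : List (List (String × String))) (h : ∃ m ∈ M, pvB_key m = key) :
    pvUpdF key fl (M ++ N) = pvUpdF key fl M ++ N := by
  induction M with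
  | nil => simp at h
  | cons m rest ih =>
      by_cases hk : pvB_key m = key
      · simp [pvUpdF, hk]
      · have h' : ∃ m ∈ rest, pvB_key m = key := by
          rcases h with ⟨x, hx, hxk⟩
          rcases List.mem_cons.mp hx with rfl | hx'
          · exact absurd hxk hk
          · exact ⟨x, hx', hxk⟩
        simp [pvUpdF, hk, ih h']

theorem pv_updF_keys (key : String) (fl : Bool × Bool) (M : List (List (String × String))) (k : String) :
    (∃ m ∈ pvUpdF key fl M, pvB_key m = k) ↔ (∃ m ∈ M, pvB_key m = k) := by
  induction M with
  | nil => simp [pvUpdF]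
  | cons m rest ih =>
      by_cases hk : pvB_key m = key
      · simp [pvUpdF, hk, pv_key_bump]
      · simp [pvUpdF, hk, ih]

theorem pv_applyF_congr (X : List (List (String × String)))
    (f g : String → Option (Bool × Bool)) (h : ∀ k, f k = g k) :
    pvApplyF X f = pvApplyF X g := by
  induction X generalizing f g with
  | nil => rfl
  | cons m rest ih =>
      simp only [pvApplyF, h (pvB_key m)]
      cases g (pvB_key m) with
      | none => simp [ih _ _ h]
      | some fl =>
          rw [ih (pvUpdN f (pvB_key m)) (pvUpdN g (pvB_key m))
            (fun k => by simp [pvUpdN, h k])]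

theorem pv_applyF_none (X : List (List (String × String)))
    (f : String → Option (Bool × Bool)) (h : ∀ k, f k = none) :
    pvApplyF X f = X := by
  induction X with
  | nil => rfl
  | cons m rest ih => simp [pvApplyF, h (pvB_key m), ih]

theorem pv_newsF_congr (items : List (List (String × String))) (Q Q' : String → Bool)
    (h : ∀ k, Q k = Q' k) : pvNewsF Q items = pvNewsF Q' items := by
  induction items generalizing Q Q' with
  | nil => rfl
  | cons item rest ih =>
      simp only [pvNewsF, h (pvB_key item)]
      by_cases hs : pvB_sum item = ""
      · simp [hs, ih _ _ h]
      · by_cases hq : Q' (pvB_key item)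
        · simp [hs, hq, ih _ _ h]
        · simp only [hs, hq, if_false]
          rw [ih (fun x => x == pvB_key item || Q x) (fun x => x == pvB_key item || Q' x)
            (fun k => by simp [h k]), ih Q Q' h]

theorem pv_flagsF_congr (items : List (List (String × String))) (Q Q' : String → Bool)
    (h : ∀ k, Q k = Q' k) (k : String) : pvFlagsF Q items k = pvFlagsF Q' items k := by
  induction items generalizing Q Q' k with
  | nil => rfl
  | cons item rest ih =>
      simp only [pvFlagsF, h (pvB_key item)]
      by_cases hs : pvB_sum item = ""
      · simp [hs, ih _ _ h]
      · by_cases hq : Q' (pvB_key item) = false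
        · simp only [hs, hq, if_false, if_true]
          exact ih _ _ (fun x => by simp [h x]) k
        · by_cases hk : pvB_key item = k
          · subst hk
            simp [hs, hq, ih _ _ h]
          · simp [hs, hq, hk, ih _ _ h]

theorem pv_apply_upd (X : List (List (String × String))) (key : String) (fl : Bool × Bool)
    (f : String → Option (Bool × Bool)) :
    pvApplyF X (fun x => if x = key then some (pvComb fl (f key)) else f x)
      = pvApplyF (pvUpdF key fl X) f := by
  induction X generalizing f with
  | nil => rfl
  | cons m rest ih =>
      by_cases hp : pvB_key m = key
      · simp only [pvApplyF, pvUpdF, hp, if_true]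
        cases hf : f key with
        | some fl₂ =>
            simp only [pvApplyF, pv_key_bump, hp, hf, pvComb]
            rw [show pvB_bump (fl.1 || fl₂.1, fl.2 || fl₂.2) m = pvB_bump fl₂ (pvB_bump fl m) from
                  pv_bump_comp fl fl₂ m,
                pv_applyF_congr rest
                  (pvUpdN (fun x => if x = key then some (fl.1 || fl₂.1, fl.2 || fl₂.2) else f x) key)
                  (pvUpdN f key)
                  (fun k => by by_cases hk : k = key <;> simp [pvUpdN, hk])]
        | none =>
            simp only [pvApplyF, pv_key_bump, hp, hf, pvComb]
            rw [pv_applyF_congr rest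
                  (pvUpdN (fun x => if x = key then some fl else f x) key) f
                  (fun k => by by_cases hk : k = key <;> simp [pvUpdN, hk, hf])]
      · simp only [pvApplyF, pvUpdF, hp, if_false]
        cases hf : f (pvB_key m) with
        | some fl₂ =>
            simp only [pvApplyF, hf, if_neg hp]
            rw [pv_applyF_congr rest
                  (pvUpdN (fun x => if x = key then some (pvComb fl (f key)) else f x) (pvB_key m))
                  (fun x => if x = key then some (pvComb fl ((pvUpdN f (pvB_key m)) key)) else (pvUpdN f (pvB_key m)) x)
                  (fun k => by
                    by_cases hk : k = pvB_key m
                    · subst hk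
                      simp [pvUpdN, hp]
                    · by_cases hk2 : k = key <;> simp [pvUpdN, hk, hk2, Ne.symm hp]),
                ih (pvUpdN f (pvB_key m))]
        | none =>
            simp only [pvApplyF, hf, if_neg hp]
            rw [ih f]

theorem pv_init_inv_gen (e : List (List (String × String)))
    (M : List (List (String × String))) (P : PySem.Set String)
    (hInv : ∀ k, (P.contains k = true) ↔ ∃ m ∈ M, pvB_key m = k) (k : String) :
    ((e.foldl (fun st item =>
        let s := pvA_sum item
        if s = "" then st
        else (st.1 ++ [item], st.2.add (PySem.Str.slice s none (some 15)))) (M, P)).2.contains k = true)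
      ↔ ∃ m ∈ (e.foldl (fun st item =>
        let s := pvA_sum item
        if s = "" then st
        else (st.1 ++ [item], st.2.add (PySem.Str.slice s none (some 15)))) (M, P)).1, pvB_key m = k := by
  induction e generalizing M P with
  | nil => exact hInv k
  | cons item rest ih =>
      simp only [List.foldl_cons]
      by_cases hs : pvA_sum item = ""
      · simp only [hs, if_true]
        exact ih M P hInv
      · simp only [hs, if_false]
        refine ih _ _ (fun k' => ?_)
        have hkey : PySem.Str.slice (pvA_sum item) none (some 15) = pvB_key item := rfl
        rw [hkey, pv_contains_add]
        constructor
        · intro h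
          rcases Bool.or_eq_true_iff.mp h with h1 | h2
          · exact ⟨item, by simp, (beq_iff_eq.mp h1).symm⟩
          · rcases (hInv k').mp h2 with ⟨m, hm, hmk⟩
            exact ⟨m, by simp [hm], hmk⟩
        · rintro ⟨m, hm, hmk⟩
          rcases List.mem_append.mp hm with hm' | hm'
          · exact Bool.or_eq_true_iff.mpr (Or.inr ((hInv k').mpr ⟨m, hm', hmk⟩))
          · have : m = item := by simpa using hm'
            subst this
            exact Bool.or_eq_true_iff.mpr (Or.inl (beq_iff_eq.mpr hmk.symm))

theorem pv_init_inv (existing : List (List (String × String))) (k : String) :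
    ((pvA_init existing).2.contains k = true) ↔ ∃ m ∈ (pvA_init existing).1, pvB_key m = k := by
  unfold pvA_init
  exact pv_init_inv_gen existing [] PySem.Set.empty (fun k' => by simp [PySem.Set.contains, PySem.Set.empty]) k

theorem pv_contains_mem (P : PySem.Set String) (x : String) :
    (P.contains x = true) ↔ x ∈ P := by
  simp [PySem.Set.contains, List.contains_iff_mem]

theorem pv_main (items : List (List (String × String)))
    (M : List (List (String × String))) (P : PySem.Set String)
    (hInv : ∀ k, (P.contains k = true) ↔ ∃ m ∈ M, pvB_key m = k) :
    (items.foldl pvA_step (M, P)).1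
      = pvApplyF (M ++ pvNewsF (fun k => P.contains k) items) (pvFlagsF (fun k => P.contains k) items) := by
  induction items generalizing M P with
  | nil =>
      simp only [List.foldl_nil, pvNewsF, List.append_nil]
      exact (pv_applyF_none M _ (fun k => rfl)).symm
  | cons item rest ih =>
      have hkey : PySem.Str.slice (pvA_sum item) none (some 15) = pvB_key item := rfl
      simp only [List.foldl_cons]
      by_cases hs : pvA_sum item = ""
      · have hs' : pvB_sum item = "" := hs
        simp only [pvA_step, hs, if_true]
        rw [ih M P hInv]
        rw [pv_applyF_congr _ (pvFlagsF (fun k => P.contains k) (item :: rest))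
              (pvFlagsF (fun k => P.contains k) rest)
              (fun k => by simp [pvFlagsF, hs'])]
        have hnews : pvNewsF (fun k => P.contains k) (item :: rest)
            = pvNewsF (fun k => P.contains k) rest := by simp [pvNewsF, hs']
        rw [hnews]
      · have hs' : ¬ pvB_sum item = "" := hs
        simp only [pvA_step, hs, if_false, hkey]
        by_cases hc : P.contains (pvB_key item) = true
        · -- existing prefix: eager update on A's side, recorded bump on B's side
          have hmem : pvB_key item ∈ P := (pv_contains_mem P _).mp hc
          simp only [hc, if_true]
          rw [pv_updateFirst_eq]
          have hInv₁ : ∀ k, (P.contains k = true) ↔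
              ∃ m ∈ pvUpdF (pvB_key item) (pvFlags item) M, pvB_key m = k := by
            intro k
            rw [hInv k, Iff.comm]
            exact pv_updF_keys _ _ _ _
          rw [ih _ P hInv₁]
          have hex : ∃ m ∈ M, pvB_key m = pvB_key item := (hInv _).mp hc
          have hnews : pvNewsF (fun k => P.contains k) (item :: rest)
              = pvNewsF (fun k => P.contains k) rest := by
            simp [pvNewsF, hs', hc, hmem]
          have hflags : ∀ k, pvFlagsF (fun k => P.contains k) (item :: rest) k
              = (fun x => if x = pvB_key item
                  then some (pvComb (pvFlags item)
                    ((pvFlagsF (fun k => P.contains k) rest) (pvB_key item)))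
                  else pvFlagsF (fun k => P.contains k) rest x) k := by
            intro k
            by_cases hk : k = pvB_key item
            · subst hk
              simp [pvFlagsF, hs', hc, hmem]
            · simp [pvFlagsF, hs', hc, hmem, hk, Ne.symm hk]
          rw [hnews, pv_applyF_congr _ _ _ hflags, pv_apply_upd,
              pv_updF_append _ _ _ _ hex]
        · -- new prefix: A appends; B queues it with no recorded bump
          have hnmem : pvB_key item ∉ P := fun hmem =>
            hc ((pv_contains_mem P _).mpr hmem)
          simp only [hc, Bool.false_eq_true, if_false]
          have hInv₂ : ∀ k, ((P.add (pvB_key item)).contains k = true) ↔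
              ∃ m ∈ M ++ [item], pvB_key m = k := by
            intro k
            rw [pv_contains_add]
            constructor
            · intro h
              rcases Bool.or_eq_true_iff.mp h with h1 | h2
              · exact ⟨item, by simp, (beq_iff_eq.mp h1).symm⟩
              · rcases (hInv k).mp h2 with ⟨m, hm, hmk⟩
                exact ⟨m, by simp [hm], hmk⟩
            · rintro ⟨m, hm, hmk⟩
              rcases List.mem_append.mp hm with hm' | hm'
              · exact Bool.or_eq_true_iff.mpr (Or.inr ((hInv k).mpr ⟨m, hm', hmk⟩))
              · have : m = item := by simpa using hm'
                subst this
                exact Bool.or_eq_true_iff.mpr (Or.inl (beq_iff_eq.mpr hmk.symm))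
          rw [ih _ _ hInv₂]
          have hQ : ∀ x, ((P.add (pvB_key item)).contains x)
              = (x == pvB_key item || P.contains x) := fun x => pv_contains_add P _ x
          rw [pv_newsF_congr rest _ _ hQ,
              pv_applyF_congr _ (pvFlagsF (fun k => (P.add (pvB_key item)).contains k) rest)
                (pvFlagsF (fun x => x == pvB_key item || P.contains x) rest)
                (fun k => pv_flagsF_congr rest _ _ hQ k)]
          have hflags : ∀ k, pvFlagsF (fun k => P.contains k) (item :: rest) k
              = pvFlagsF (fun x => x == pvB_key item || P.contains x) rest k := by
            intro k
            simp [pvFlagsF, hs', hc, hnmem]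
          rw [pv_applyF_congr _ _ _ hflags]
          have hlist : M ++ pvNewsF (fun k => P.contains k) (item :: rest)
              = (M ++ [item]) ++ pvNewsF (fun x => x == pvB_key item || P.contains x) rest := by
            simp [pvNewsF, hs', hc, hnmem]
          rw [hlist]

theorem pv_bridge (items : List (List (String × String))) (P0 : PySem.Set String)
    (news : List (List (String × String))) (seen : PySem.Set String)
    (bumps : PySem.Dict String (Bool × Bool)) :
    (items.foldl (pvB_scanStep P0) (news, seen, bumps)).1
      = news ++ pvNewsF (fun k => P0.contains k || seen.contains k) items
    ∧ ∀ k, (items.foldl (pvB_scanStep P0) (news, seen, bumps)).2.2.get? k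
      = pvCombO (bumps.get? k) (pvFlagsF (fun k => P0.contains k || seen.contains k) items k) := by
  induction items generalizing news seen bumps with
  | nil =>
      refine ⟨by simp [pvNewsF], fun k => ?_⟩
      simp only [List.foldl_nil, pvFlagsF]
      cases hb : bumps.get? k <;> simp [pvCombO]
  | cons item rest ih =>
      simp only [List.foldl_cons]
      by_cases hs : pvB_sum item = ""
      · have hstep : pvB_scanStep P0 (news, seen, bumps) item = (news, seen, bumps) := by
          simp [pvB_scanStep, hs]
        rw [hstep]
        refine ⟨?_, fun k => ?_⟩
        · rw [(ih news seen bumps).1]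
          simp [pvNewsF, hs]
        · rw [(ih news seen bumps).2 k]
          simp [pvFlagsF, hs]
      · have hkey : PySem.Str.slice (pvB_sum item) none (some 15) = pvB_key item := rfl
        by_cases hcond : (P0.contains (pvB_key item) = false ∧ seen.contains (pvB_key item) = false)
        · -- a brand-new clue: queued, no bump recorded
          have hnm1 : pvB_key item ∉ P0 := fun h => by
            have h2 := (pv_contains_mem P0 _).mpr h
            rw [hcond.1] at h2
            cases h2
          have hnm2 : pvB_key item ∉ seen := fun h => by
            have h2 := (pv_contains_mem seen _).mpr h
            rw [hcond.2] at h2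
            cases h2
          have hstep : pvB_scanStep P0 (news, seen, bumps) item
              = (news ++ [item], seen.add (pvB_key item), bumps) := by
            simp [pvB_scanStep, hs, hkey, hnm1, hnm2]
          rw [hstep]
          have hQ : ∀ x, (P0.contains x || (seen.add (pvB_key item)).contains x)
              = (x == pvB_key item || (P0.contains x || seen.contains x)) := by
            intro x
            rw [pv_contains_add]
            cases P0.contains x <;> cases seen.contains x <;> cases (x == pvB_key item) <;> rfl
          refine ⟨?_, fun k => ?_⟩
          · rw [(ih (news ++ [item]) (seen.add (pvB_key item)) bumps).1,
                pv_newsF_congr rest _ _ hQ]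
            simp [pvNewsF, hs, hnm1, hnm2]
          · rw [(ih (news ++ [item]) (seen.add (pvB_key item)) bumps).2 k,
                pv_flagsF_congr rest _ _ hQ k]
            have : pvFlagsF (fun k => P0.contains k || seen.contains k) (item :: rest) k
                = pvFlagsF (fun x => x == pvB_key item || (P0.contains x || seen.contains x)) rest k := by
              simp [pvFlagsF, hs, hnm1, hnm2]
            rw [this]
        · -- a known prefix: only the bump table changes
          have hQtrue : (P0.contains (pvB_key item) || seen.contains (pvB_key item)) = true := by
            cases hP : P0.contains (pvB_key item) <;> cases hS : seen.contains (pvB_key item) <;> simp_all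
          have hstep : pvB_scanStep P0 (news, seen, bumps) item
              = (news, seen, bumps.insert (pvB_key item)
                  ((bumps.getD (pvB_key item) (false, false)).1 || (pvFlags item).1,
                   (bumps.getD (pvB_key item) (false, false)).2 || (pvFlags item).2)) := by
            simp only [pvB_scanStep, pvFlags]
            rw [if_neg hs, hkey, if_neg hcond]
          rw [hstep]
          set fl := pvFlags item with hfl
          set bumps' := bumps.insert (pvB_key item)
              ((bumps.getD (pvB_key item) (false, false)).1 || fl.1,
               (bumps.getD (pvB_key item) (false, false)).2 || fl.2) with hb'
          refine ⟨?_, fun k => ?_⟩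
          · rw [(ih news seen bumps').1]
            have hnews2 : pvNewsF (fun k => P0.contains k || seen.contains k) (item :: rest)
                = pvNewsF (fun k => P0.contains k || seen.contains k) rest := by
              simp only [pvNewsF]
              rw [if_neg hs, if_pos hQtrue]
            rw [hnews2]
          · rw [(ih news seen bumps').2 k]
            have hflags : pvFlagsF (fun k => P0.contains k || seen.contains k) (item :: rest) k
                = if pvB_key item = k
                    then some (pvComb fl (pvFlagsF (fun k => P0.contains k || seen.contains k) rest k))
                    else pvFlagsF (fun k => P0.contains k || seen.contains k) rest k := by
              simp only [pvFlagsF]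
              rw [if_neg hs, if_neg (show ¬ (P0.contains (pvB_key item) || seen.contains (pvB_key item)) = false from
                fun h => by rw [h] at hQtrue; exact Bool.noConfusion hQtrue)]
            rw [hflags]
            by_cases hk : pvB_key item = k
            · subst hk
              rw [if_pos rfl, hb', PySem.Dict.get?_insert_self,
                  PySem.Dict.getD_eq_get?_getD]
              cases hbg : bumps.get? (pvB_key item) with
              | none =>
                  cases hF : pvFlagsF (fun k => P0.contains k || seen.contains k) rest (pvB_key item) with
                  | none => simp [pvCombO, pvComb]
                  | some g => simp [pvCombO, pvComb]
              | some b =>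
                  cases hF : pvFlagsF (fun k => P0.contains k || seen.contains k) rest (pvB_key item) with
                  | none => simp [pvCombO, pvComb]
                  | some g => simp [pvCombO, pvComb, Bool.or_assoc]
            · rw [if_neg hk, hb', PySem.Dict.get?_insert_of_ne _ _ (fun h => hk h.symm)]

theorem pv_bapply_eq (X : List (List (String × String))) (bumps : PySem.Dict String (Bool × Bool)) :
    pvB_apply X bumps = pvApplyF X (fun k => bumps.get? k) := by
  induction X generalizing bumps with
  | nil => rfl
  | cons m rest ih =>
      simp only [pvB_apply, pvApplyF]
      cases hb : bumps.get? (pvB_key m) with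
      | none => rw [ih bumps]
      | some fl =>
          rw [ih (bumps.erase (pvB_key m)),
              pv_applyF_congr rest (fun k => (bumps.erase (pvB_key m)).get? k)
                (pvUpdN (fun k => bumps.get? k) (pvB_key m))
                (fun k => by
                  by_cases hk : k = pvB_key m
                  · subst hk
                    simp [pvUpdN, pv_get?_erase_self]
                  · simp [pvUpdN, hk, pv_get?_erase_ne _ _ _ hk])]


theorem pv_final (existing incoming : List (List (String × String))) :
    merge_clues_py existing incoming = merge_clues_py_alt existing incoming := by
  unfold merge_clues_py merge_clues_py_alt
  refine congrArg (fun l => PySem.List.slice l none (some 20)) ?_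
  have hinit : pvB_init existing = pvA_init existing := rfl
  rw [hinit]
  have hmain := pv_main incoming (pvA_init existing).1 (pvA_init existing).2
    (fun k => pv_init_inv existing k)
  have hbr := pv_bridge incoming (pvA_init existing).2 [] PySem.Set.empty PySem.Dict.empty
  have hQ : ∀ x, ((pvA_init existing).2.contains x || PySem.Set.empty.contains x)
      = (pvA_init existing).2.contains x := by
    intro x
    simp [PySem.Set.empty, PySem.Set.contains]
  rw [pv_bapply_eq]
  rw [pv_applyF_congr _ _ (pvFlagsF (fun k => (pvA_init existing).2.contains k) incoming)
        (fun k => by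
          rw [hbr.2 k, PySem.Dict.get?_empty]
          show pvFlagsF _ incoming k = _
          exact pv_flagsF_congr incoming _ _ hQ k)]
  rw [hbr.1]
  rw [pv_newsF_congr incoming _ _ hQ]
  simp only [List.nil_append]
  exact hmain

-- ===== VERDICT (by name: the statement is the Claim_ definition above) =====
theorem merge_clues_py_spec : Claim_equal_merge_clues_py := by
  intro existing incoming _
  unfold Spec_merge_clues_py
  exact pv_final existing incoming
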